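-- pv_equiv track=rewrite | github.com/PropterMalone/quizwind | parse_pdf_v2.py | is_skip_question
-- ===== SOURCE A (Python) =====
-- def is_skip_question(text: str) -> bool:
--     """Detect questions that should be skipped (diagrams, free-response, etc.)."""
--     text_lower = text.lower()
--     skip_keywords = [
--         "diagram", "graph", "chart", "map", "picture",
--         "draw an arrow", "in one sentence", "in two sentences",
--         "what do the acronyms", "what is betz"
--     ]
--     return any(keyword in text_lower for keyword in skip_keywords)
-- ===== SOURCE B (Python) =====
-- _SKIP_KEYWORDS = [
--     "diagram", "graph", "chart", "map", "picture",
--     "draw an arrow", "in one sentence", "in two sentences",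
--     "what do the acronyms", "what is betz"
-- ]
--
--
-- def is_skip_question(text: str) -> bool:
--     """Single left-to-right scan: at each position check whether a keyword starts there."""
--     t = text.lower()
--     n = len(t)
--     i = 0
--     while True:
--         if any(t.startswith(kw, i) for kw in _SKIP_KEYWORDS):
--             return True
--         if i == n:
--             return False
--         i += 1
-- ===== Notes on version B (the rewrite author's own statement) =====
-- stated objective: alternative
-- what changed: Replaces the k independent Python substring-membership searches over the text with one left-to-right scan of the lowercased text that checks at each position whether any keyword starts there via startswith with an offset, traversing the text once.
import Mathlib
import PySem

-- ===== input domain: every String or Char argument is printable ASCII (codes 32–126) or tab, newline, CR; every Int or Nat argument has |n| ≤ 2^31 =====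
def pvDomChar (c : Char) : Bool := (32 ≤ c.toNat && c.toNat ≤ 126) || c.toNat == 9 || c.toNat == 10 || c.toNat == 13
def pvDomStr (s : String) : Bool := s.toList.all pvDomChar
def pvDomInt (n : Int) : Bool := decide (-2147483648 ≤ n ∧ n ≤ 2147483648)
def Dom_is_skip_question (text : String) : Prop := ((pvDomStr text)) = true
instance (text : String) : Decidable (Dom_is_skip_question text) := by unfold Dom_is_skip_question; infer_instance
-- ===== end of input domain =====

-- B replaces the per-keyword substring searches with one left-to-right scan of the
-- lowercased text checking at each position whether any keyword starts there (alternative, same cost).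


-- ===== PORT A =====
def is_skip_question (text : String) : Bool :=
  let text_lower := PySem.Str.lower text
  let skip_keywords : List String :=
    ["diagram", "graph", "chart", "map", "picture",
     "draw an arrow", "in one sentence", "in two sentences",
     "what do the acronyms", "what is betz"]
  skip_keywords.any (fun keyword => PySem.Str.isIn keyword text_lower)

-- ===== PORT B =====
def skipKeywordsB : List (List Char) :=
  ["diagram".toList, "graph".toList, "chart".toList, "map".toList, "picture".toList,
   "draw an arrow".toList, "in one sentence".toList, "in two sentences".toList,
   "what do the acronyms".toList, "what is betz".toList]

-- the while loop of Source B: at position i check 'startswith kw at i' for each keyword,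
-- then advance; structural recursion over the suffix t[i:]
def skipScanB (t : List Char) : Bool :=
  (skipKeywordsB.any fun kw => kw.isPrefixOf t) ||
  (match t with
   | [] => false
   | _ :: rest => skipScanB rest)

def is_skip_question_alt (text : String) : Bool :=
  skipScanB (PySem.Str.lower text).toList

-- ===== PRECONDITION & SPEC =====
def Spec_is_skip_question (text : String) (out : Bool) : Prop := out = is_skip_question_alt text
instance (text : String) (out : Bool) : Decidable (Spec_is_skip_question text out) := by unfold Spec_is_skip_question; infer_instance

-- ===== CLAIM (what is proved, stated in full; the proofs are below) =====
def Claim_equal_is_skip_question : Prop := ∀ (text : String), Dom_is_skip_question text → Spec_is_skip_question text (is_skip_question text)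

-- ===== LEMMAS AND PROOFS =====

-- the scan finds a keyword iff some keyword is a prefix of some suffix
theorem skipScanB_iff (t : List Char) :
    skipScanB t = true ↔ ∃ kw ∈ skipKeywordsB, ∃ j, kw <+: t.drop j := by
  induction t with
  | nil =>
      rw [skipScanB]
      simp only [List.any_eq_true, Bool.or_eq_true, List.isPrefixOf_iff_prefix]
      constructor
      · rintro (⟨kw, hkw, hp⟩ | h)
        · exact ⟨kw, hkw, 0, by simpa using hp⟩
        · cases h
      · rintro ⟨kw, hkw, j, hp⟩
        exact Or.inl ⟨kw, hkw, by simpa using hp⟩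
  | cons c rest ih =>
      rw [skipScanB]
      simp only [List.any_eq_true, Bool.or_eq_true, List.isPrefixOf_iff_prefix, ih]
      constructor
      · rintro (⟨kw, hkw, hp⟩ | ⟨kw, hkw, j, hp⟩)
        · exact ⟨kw, hkw, 0, by simpa using hp⟩
        · exact ⟨kw, hkw, j + 1, by simpa using hp⟩
      · rintro ⟨kw, hkw, j, hp⟩
        cases j with
        | zero => exact Or.inl ⟨kw, hkw, by simpa using hp⟩
        | succ j => exact Or.inr ⟨kw, hkw, j, by simpa using hp⟩

theorem skipScanB_eq_any_isIn (t : List Char) :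
    skipScanB t = skipKeywordsB.any (fun kw => PySem.Chars.isIn kw t) := by
  rcases h : skipKeywordsB.any (fun kw => PySem.Chars.isIn kw t) with _ | _
  · rw [← Bool.not_eq_true, skipScanB_iff]
    rintro ⟨kw, hkw, j, hp⟩
    have : PySem.Chars.isIn kw t = true :=
      (PySem.Chars.exists_prefix_drop_iff_isIn kw t).mp ⟨j, hp⟩
    simp only [List.any_eq_false] at h
    exact absurd this (by simpa using h kw hkw)
  · rw [skipScanB_iff]
    simp only [List.any_eq_true] at h
    rcases h with ⟨kw, hkw, hin⟩
    rcases (PySem.Chars.exists_prefix_drop_iff_isIn kw t).mpr hin with ⟨j, hp⟩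
    exact ⟨kw, hkw, j, hp⟩

-- ===== VERDICT (by name: the statement is the Claim_ definition above) =====
theorem is_skip_question_spec : Claim_equal_is_skip_question := by
  intro text _
  show is_skip_question text = is_skip_question_alt text
  rw [is_skip_question, is_skip_question_alt, skipScanB_eq_any_isIn]
  simp [skipKeywordsB, PySem.Str.isIn]
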